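-- pv_equiv track=rewrite | github.com/YiqunPeng/leetcode_pro | solutions/909_snakes_and_ladders.py | _map_numbers
-- ===== SOURCE A (Python) =====
-- def _map_numbers(n, board):
--     d = {}
--     v = 1
--     for i in range(n - 1, -1, -1):
--         if (n - 1 - i) % 2 == 0:
--             for j in range(n):
--                 d[v] = board[i][j]
--                 v += 1
--         else:
--             for j in range(n - 1, -1, -1):
--                 d[v] = board[i][j]
--                 v += 1
--     return d
-- ===== SOURCE B (Python) =====
-- def _map_numbers(n, board):
--     d = {}
--     for v in range(1, n * n + 1):
--         q, r = divmod(v - 1, n)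
--         i = n - 1 - q
--         j = r if q % 2 == 0 else n - 1 - r
--         d[v] = board[i][j]
--     return d
-- ===== Notes on version B (the rewrite author's own statement) =====
-- stated objective: alternative
-- what changed: Replaces the two nested direction-dependent row loops with a threaded counter by one flat loop over the square numbers 1..n*n that decodes each number into board coordinates in closed form via divmod and a parity test.
-- outside the precondition, e.g. on _map_numbers(-2, [[1, 2], [3, 4]]): A returns {}, B raises IndexError
import Mathlib
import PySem

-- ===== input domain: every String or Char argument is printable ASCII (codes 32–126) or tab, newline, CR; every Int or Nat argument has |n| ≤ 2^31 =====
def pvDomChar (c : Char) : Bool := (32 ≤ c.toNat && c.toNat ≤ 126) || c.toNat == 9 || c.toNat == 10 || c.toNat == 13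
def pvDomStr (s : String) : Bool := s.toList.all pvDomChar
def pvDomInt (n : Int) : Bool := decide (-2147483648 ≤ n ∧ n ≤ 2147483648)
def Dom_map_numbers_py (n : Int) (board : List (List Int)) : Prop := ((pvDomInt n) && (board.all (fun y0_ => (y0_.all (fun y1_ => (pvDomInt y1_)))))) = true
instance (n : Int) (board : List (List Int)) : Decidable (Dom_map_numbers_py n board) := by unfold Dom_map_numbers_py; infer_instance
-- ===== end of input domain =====

-- B replaces A's nested direction-dependent row loops and threaded counter by one flat loop
-- over the square numbers 1..n*n, decoding each into board coordinates via divmod (objective: alternative).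


-- ===== PORT A =====
-- literal transliteration of A: dict + counter v, outer i from n-1 down to 0,
-- inner j left-to-right on even rows-from-bottom, right-to-left on odd ones.
def map_numbers_py (n : Int) (board : List (List Int)) : List (Int × Int) :=
  (((PySem.List.pyRange (n - 1) (-1) (-1)).foldl
      (fun (st : PySem.Dict Int Int × Int) (i : Int) =>
        if PySem.Int.mod (n - 1 - i) 2 == 0 then
          (PySem.List.pyRange 0 n 1).foldl
            (fun st j => (st.1.insert st.2 (PySem.List.pyGetD (PySem.List.pyGetD board i []) j 0), st.2 + 1)) st
        else
          (PySem.List.pyRange (n - 1) (-1) (-1)).foldl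
            (fun st j => (st.1.insert st.2 (PySem.List.pyGetD (PySem.List.pyGetD board i []) j 0), st.2 + 1)) st)
      (PySem.Dict.empty, 1)).1).items

-- ===== PORT B =====
-- literal transliteration of B: for v in range(1, n*n + 1): q, r = divmod(v-1, n);
-- i = n-1-q; j = r if q % 2 == 0 else n-1-r; d[v] = board[i][j]
def map_numbers_py_alt (n : Int) (board : List (List Int)) : List (Int × Int) :=
  ((PySem.List.pyRange 1 (n * n + 1) 1).foldl
      (fun (d : PySem.Dict Int Int) (v : Int) =>
        let q := PySem.Int.floordiv (v - 1) n
        let r := PySem.Int.mod (v - 1) n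
        let i := n - 1 - q
        let j := if PySem.Int.mod q 2 == 0 then r else n - 1 - r
        d.insert v (PySem.List.pyGetD (PySem.List.pyGetD board i []) j 0))
      PySem.Dict.empty).items

-- ===== PRECONDITION & SPEC =====
-- Pre_ restricts to the natural domain of a board side length, 0 ≤ n (on negative n A
-- accidentally returns {} while B's flat loop over range(1, n*n+1) raises IndexError),
-- and excludes exactly the inputs where A raises IndexError: fewer than n rows,
-- or one of the n rows read has fewer than n entries.
def Pre_map_numbers_py (n : Int) (board : List (List Int)) : Prop :=
  0 ≤ n ∧ n ≤ (board.length : Int) ∧ ∀ row ∈ board.take n.toNat, n ≤ (row.length : Int)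
instance (n : Int) (board : List (List Int)) : Decidable (Pre_map_numbers_py n board) := by unfold Pre_map_numbers_py; infer_instance
def pvWitness_map_numbers_py : Int × List (List Int) := (2, [[1, 2], [3, 4]])

def Spec_map_numbers_py (n : Int) (board : List (List Int)) (out : List (Int × Int)) : Prop := out = map_numbers_py_alt n board
instance (n : Int) (board : List (List Int)) (out : List (Int × Int)) : Decidable (Spec_map_numbers_py n board out) := by unfold Spec_map_numbers_py; infer_instance

-- ===== CLAIM (what is proved, stated in full; the proofs are below) =====
def Claim_equal_map_numbers_py : Prop := ∀ (n : Int) (board : List (List Int)), Dom_map_numbers_py n board → Pre_map_numbers_py n board → Spec_map_numbers_py n board (map_numbers_py n board)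

-- ===== LEMMAS AND PROOFS =====

-- generic: folding fresh, strictly increasing keyed pairs into a dict appends them to items
theorem pvItemsFoldlInsert (l : List (Int × Int)) (d : PySem.Dict Int Int)
    (hfresh : ∀ p ∈ l, d.contains p.1 = false)
    (hp : l.Pairwise (fun p q => p.1 < q.1)) :
    (l.foldl (fun d p => d.insert p.1 p.2) d).items = d.items ++ l := by
  induction l generalizing d with
  | nil => simp
  | cons p l ih =>
    have hf0 : d.contains p.1 = false := hfresh p (by simp)
    simp only [List.foldl_cons]
    rw [ih _ ?_ (List.Pairwise.of_cons hp)]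
    · rw [PySem.Dict.items_insert_of_not_contains d p.2 hf0]
      simp
    · intro q hq
      rw [PySem.Dict.contains_insert]
      have hlt : p.1 < q.1 := (List.pairwise_cons.mp hp).1 q hq
      have hne : (q.1 == p.1) = false := by simp; omega
      simp [hne, hfresh q (by simp [hq])]

-- A's inner row loop threads the counter: it is an insert-fold over an enumerate
theorem pvInnerFold (f : Int → Int) (l : List Int) (d : PySem.Dict Int Int) (c : Int) :
    l.foldl (fun (st : PySem.Dict Int Int × Int) j => (st.1.insert st.2 (f j), st.2 + 1)) (d, c)
      = ((PySem.List.enumerate (l.map f) c).foldl (fun d p => d.insert p.1 p.2) d, c + l.length) := by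
  induction l generalizing d c with
  | nil => simp
  | cons j l ih =>
    simp only [List.map_cons, PySem.List.enumerate_cons, List.foldl_cons]
    rw [ih]
    refine Prod.ext rfl ?_
    push_cast [List.length_cons]
    omega

-- the list of values A writes during the row with outer index i
def pvRowVals (n : Int) (board : List (List Int)) (i : Int) : List Int :=
  (if PySem.Int.mod (n - 1 - i) 2 == 0 then PySem.List.pyRange 0 n 1
   else PySem.List.pyRange (n - 1) (-1) (-1)).map
    (fun j => PySem.List.pyGetD (PySem.List.pyGetD board i []) j 0)

-- all (key, value) pairs A inserts while processing the outer indices L, counter starting at c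
def pvEntriesA (n : Int) (board : List (List Int)) : List Int → Int → List (Int × Int)
  | [], _ => []
  | i :: L, c =>
      PySem.List.enumerate (pvRowVals n board i) c ++
        pvEntriesA n board L (c + (pvRowVals n board i).length)

-- the cell B reads for square number v (the body of B's flat loop)
def pvCellB (n : Int) (board : List (List Int)) (v : Int) : Int :=
  PySem.List.pyGetD
    (PySem.List.pyGetD board (n - 1 - PySem.Int.floordiv (v - 1) n) [])
    (if PySem.Int.mod (PySem.Int.floordiv (v - 1) n) 2 == 0 then PySem.Int.mod (v - 1) n
     else n - 1 - PySem.Int.mod (v - 1) n) 0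

theorem pvRowVals_length (n : Int) (board : List (List Int)) (i : Int) :
    (pvRowVals n board i).length = n.toNat := by
  unfold pvRowVals
  split <;> simp [PySem.List.length_pyRange_one, PySem.List.length_pyRange_neg_one]

-- A's outer loop as one fold over its entry list
theorem pvOuterFold (n : Int) (board : List (List Int)) (L : List Int)
    (d : PySem.Dict Int Int) (c : Int) :
    L.foldl
      (fun (st : PySem.Dict Int Int × Int) (i : Int) =>
        if PySem.Int.mod (n - 1 - i) 2 == 0 then
          (PySem.List.pyRange 0 n 1).foldl
            (fun st j => (st.1.insert st.2 (PySem.List.pyGetD (PySem.List.pyGetD board i []) j 0), st.2 + 1)) st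
        else
          (PySem.List.pyRange (n - 1) (-1) (-1)).foldl
            (fun st j => (st.1.insert st.2 (PySem.List.pyGetD (PySem.List.pyGetD board i []) j 0), st.2 + 1)) st)
      (d, c)
    = ((pvEntriesA n board L c).foldl (fun d p => d.insert p.1 p.2) d,
        c + ((L.map (fun i => (pvRowVals n board i).length)).sum : Int)) := by
  induction L generalizing d c with
  | nil => simp [pvEntriesA]
  | cons i L ih =>
    simp only [List.foldl_cons]
    have hstep :
        (if PySem.Int.mod (n - 1 - i) 2 == 0 then
          (PySem.List.pyRange 0 n 1).foldl
            (fun st j => (st.1.insert st.2 (PySem.List.pyGetD (PySem.List.pyGetD board i []) j 0), st.2 + 1)) (d, c)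
        else
          (PySem.List.pyRange (n - 1) (-1) (-1)).foldl
            (fun st j => (st.1.insert st.2 (PySem.List.pyGetD (PySem.List.pyGetD board i []) j 0), st.2 + 1)) (d, c))
        = ((PySem.List.enumerate (pvRowVals n board i) c).foldl (fun d p => d.insert p.1 p.2) d,
            c + (pvRowVals n board i).length) := by
      by_cases h : PySem.Int.mod (n - 1 - i) 2 == 0
      · rw [if_pos h, pvInnerFold]
        unfold pvRowVals
        rw [if_pos h]
        simp
      · rw [if_neg h, pvInnerFold]
        unfold pvRowVals
        rw [if_neg h]
        simp
    rw [hstep, ih]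
    refine Prod.ext ?_ ?_
    · simp [pvEntriesA, List.foldl_append]
    · simp only [List.map_cons, List.sum_cons]
      push_cast
      ring

-- getElem form of enumerate
theorem pvEnumGet (xs : List Int) (s : Int) (k : Nat) (hk : k < xs.length) :
    (PySem.List.enumerate xs s)[k]'(by simpa [PySem.List.length_enumerate] using hk)
      = (s + (k : Int), xs[k]) := by
  induction xs generalizing s k with
  | nil => simp at hk
  | cons x xs ih =>
    cases k with
    | zero => simp [PySem.List.enumerate_cons]
    | succ k =>
      simp only [PySem.List.enumerate_cons, List.getElem_cons_succ]
      rw [ih (s + 1) k (by simpa using hk)]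
      refine Prod.ext ?_ rfl
      push_cast
      ring

-- the block of A's entries for row-from-bottom q equals B's map over its key range
theorem pvBlock (n : Int) (board : List (List Int)) (hn : 0 < n)
    (q : Nat) (_hq : (q : Int) < n) :
    PySem.List.enumerate (pvRowVals n board (n - 1 - (q : Int))) ((q : Int) * n + 1)
      = (PySem.List.pyRange ((q : Int) * n + 1) ((q : Int) * n + 1 + n) 1).map
          (fun v => (v, pvCellB n board v)) := by
  apply List.ext_getElem
  · simp [PySem.List.length_enumerate, pvRowVals_length, PySem.List.length_pyRange_one]
  · intro k hk1 hk2
    have hkn : k < n.toNat := by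
      simpa [PySem.List.length_enumerate, pvRowVals_length] using hk1
    rw [pvEnumGet _ _ k (by simpa [pvRowVals_length] using hkn)]
    simp only [List.getElem_map, PySem.List.getElem_pyRange_one]
    have hv : (q : Int) * n + 1 + (k : Int) - 1 = (q : Int) * n + (k : Int) := by ring
    have hfd : PySem.Int.floordiv ((q : Int) * n + (k : Int)) n = (q : Int) := by
      refine (PySem.Int.floordiv_eq_iff_of_pos hn).mpr ⟨by omega, ?_⟩
      have : ((q : Int) + 1) * n = (q : Int) * n + n := by ring
      omega
    have hmd : PySem.Int.mod ((q : Int) * n + (k : Int)) n = (k : Int) := by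
      have h := PySem.Int.floordiv_mul_add_mod ((q : Int) * n + (k : Int)) n
      rw [hfd] at h
      omega
    refine Prod.ext rfl ?_
    unfold pvCellB pvRowVals
    rw [hv, hfd, hmd]
    have harg : n - 1 - (n - 1 - (q : Int)) = (q : Int) := by ring
    simp only [harg]
    by_cases hpar : (PySem.Int.mod (q : Int) 2 == 0) = true
    · simp only [hpar, if_true, List.getElem_map, PySem.List.getElem_pyRange_one]
      norm_num
    · rw [Bool.not_eq_true] at hpar
      simp only [hpar, Bool.false_eq_true, if_false, PySem.List.pyRange_neg_one,
        List.getElem_map, List.getElem_range]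

-- A's entry list over the descending outer range is B's map over the square numbers
theorem pvMainAux (n : Int) (board : List (List Int)) (hn : 0 ≤ n) :
    ∀ t : Nat, t ≤ n.toNat →
      pvEntriesA n board (PySem.List.pyRange ((t : Int) - 1) (-1) (-1))
          (((n.toNat - t) * n.toNat + 1 : Nat) : Int)
      = (PySem.List.pyRange (((n.toNat - t) * n.toNat + 1 : Nat) : Int) (n * n + 1) 1).map
          (fun v => (v, pvCellB n board v)) := by
  intro t
  induction t with
  | zero =>
    intro _
    have hsq : ((n.toNat * n.toNat + 1 : Nat) : Int) = n * n + 1 := by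
      push_cast [Int.toNat_of_nonneg hn]
      ring
    simp only [Nat.sub_zero]
    rw [show ((0:Nat):Int) - 1 = (-1 : Int) by norm_num,
      PySem.List.pyRange_neg_one_eq_nil (by omega), hsq,
      PySem.List.pyRange_one_eq_nil le_rfl]
    simp [pvEntriesA]
  | succ t ih =>
    intro ht
    have hnpos : 0 < n := by omega
    have hq : ((n.toNat - (t + 1) : Nat) : Int) < n := by omega
    rw [show ((t + 1 : Nat) : Int) - 1 = (t : Int) by push_cast; ring,
      PySem.List.pyRange_neg_one_cons (by omega : (-1:Int) < (t:Int))]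
    simp only [pvEntriesA]
    rw [pvRowVals_length]
    have hc : (((n.toNat - (t + 1)) * n.toNat + 1 : Nat) : Int)
        = ((n.toNat - (t + 1) : Nat) : Int) * n + 1 := by
      push_cast [Int.toNat_of_nonneg hn]
      ring
    have hi : (t : Int) = n - 1 - ((n.toNat - (t + 1) : Nat) : Int) := by omega
    have hcn : (((n.toNat - (t + 1)) * n.toNat + 1 : Nat) : Int) + (n.toNat : Int)
        = (((n.toNat - t) * n.toNat + 1 : Nat) : Int) := by
      have : n.toNat - t = (n.toNat - (t + 1)) + 1 := by omega
      rw [this]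
      push_cast
      ring
    rw [hcn, ih (by omega)]
    rw [PySem.List.pyRange_one_append (((n.toNat - (t + 1)) * n.toNat + 1 : Nat) : Int)
        (((n.toNat - t) * n.toNat + 1 : Nat) : Int) (n * n + 1) ?_ ?_, List.map_append]
    · congr 1
      rw [hi, hc]
      rw [show (((n.toNat - t) * n.toNat + 1 : Nat) : Int)
          = ((n.toNat - (t + 1) : Nat) : Int) * n + 1 + n by
        rw [← hcn, hc]; push_cast [Int.toNat_of_nonneg hn]; ring]
      exact pvBlock n board hnpos (n.toNat - (t + 1)) hq
    · rw [← hcn]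
      omega
    · have hle : ((n.toNat - t : Nat) : Int) ≤ n := by omega
      have : (((n.toNat - t) * n.toNat + 1 : Nat) : Int)
          = ((n.toNat - t : Nat) : Int) * n + 1 := by
        push_cast [Int.toNat_of_nonneg hn]; ring
      rw [this]
      nlinarith
  
theorem pvMain (n : Int) (board : List (List Int)) (hn : 0 ≤ n) :
    pvEntriesA n board (PySem.List.pyRange (n - 1) (-1) (-1)) 1
      = (PySem.List.pyRange 1 (n * n + 1) 1).map (fun v => (v, pvCellB n board v)) := by
  have h := pvMainAux n board hn n.toNat le_rfl
  rw [Nat.sub_self] at h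
  simp only [Nat.zero_mul] at h
  rw [show ((n.toNat : Nat) : Int) - 1 = n - 1 by omega] at h
  simpa using h

theorem pvEntriesA_pairwise_of_eq (n : Int) (board : List (List Int)) (hn : 0 ≤ n) :
    (pvEntriesA n board (PySem.List.pyRange (n - 1) (-1) (-1)) 1).Pairwise
      (fun p q => p.1 < q.1) := by
  rw [pvMain n board hn]
  refine List.pairwise_map.mpr ?_
  exact List.Pairwise.imp (fun h => h) (PySem.List.pairwise_lt_pyRange_one _ _)

theorem pvEmptyFresh (l : List (Int × Int)) :
    ∀ p ∈ l, (PySem.Dict.empty : PySem.Dict Int Int).contains p.1 = false := by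
  intro p _
  simp [PySem.Dict.contains, PySem.Dict.empty]

-- ===== VERDICT (by name: the statement is the Claim_ definition above) =====
theorem map_numbers_py_spec : Claim_equal_map_numbers_py := by
  intro n board _ hPre
  unfold Spec_map_numbers_py
  obtain ⟨hn, _h1, _h2⟩ := hPre
  have hmain := pvMain n board hn
  have hA : map_numbers_py n board
      = pvEntriesA n board (PySem.List.pyRange (n - 1) (-1) (-1)) 1 := by
    unfold map_numbers_py
    rw [pvOuterFold]
    show ((pvEntriesA n board (PySem.List.pyRange (n - 1) (-1) (-1)) 1).foldl
        (fun d p => d.insert p.1 p.2) PySem.Dict.empty).items = _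
    rw [pvItemsFoldlInsert _ _ (pvEmptyFresh _) (pvEntriesA_pairwise_of_eq n board hn)]
    rfl
  have hB : map_numbers_py_alt n board
      = (PySem.List.pyRange 1 (n * n + 1) 1).map (fun v => (v, pvCellB n board v)) := by
    unfold map_numbers_py_alt
    have hfold : (PySem.List.pyRange 1 (n * n + 1) 1).foldl
        (fun (d : PySem.Dict Int Int) (v : Int) =>
          let q := PySem.Int.floordiv (v - 1) n
          let r := PySem.Int.mod (v - 1) n
          let i := n - 1 - q
          let j := if PySem.Int.mod q 2 == 0 then r else n - 1 - r
          d.insert v (PySem.List.pyGetD (PySem.List.pyGetD board i []) j 0))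
        PySem.Dict.empty
        = ((PySem.List.pyRange 1 (n * n + 1) 1).map (fun v => (v, pvCellB n board v))).foldl
            (fun d p => d.insert p.1 p.2) PySem.Dict.empty := by
      rw [List.foldl_map]
      rfl
    rw [hfold, pvItemsFoldlInsert _ _ (pvEmptyFresh _) ?_]
    · rfl
    · refine List.pairwise_map.mpr ?_
      exact List.Pairwise.imp (fun h => h) (PySem.List.pairwise_lt_pyRange_one _ _)
  rw [hA, hB, hmain]
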